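-- pv_equiv track=rewrite | github.com/nbaskar1/Workout_Problems | application_combinations.py | check
-- ===== SOURCE A (Python) =====
-- import copy
--
-- def combinations(target, app1, app2, fin_combo, max_size, app, complement):
--     if max_size < target:
--         max_size = target
--         fin_combo = []
--
--     temp_list = []
--     for f_app in app1[app]:
--         temp_list.append(f_app)
--         for b_app in app2[complement]:
--             temp_list.append(b_app)
--             fin_combo.append(copy.deepcopy(temp_list))
--             temp_list.pop(1)
--         temp_list.pop()
--
--     return (max_size, fin_combo)
--
-- def check(target, app1, app2):
--     fin_combo = []
--     max_size = 0
--
--     for app in app1: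
--         complement = target - app
--         if complement in app2:
--             max_size, fin_combo = combinations(target, app1, app2, fin_combo, max_size, app, complement)
--
--         else:
--             if max_size == target:
--                 continue
--             complement -= 1
--             while (complement >= 0 and app + complement >= max_size):
--                 if complement in app2:
--                     max_size, fin_combo = combinations(app + complement, app1, app2, fin_combo, max_size, app, complement)
--                     break
--                 complement -= 1
--     return (fin_combo)
-- ===== SOURCE B (Python) =====
-- def check(target, app1, app2):
--     fin = []
--     ms = 0
--     for app in app1:
--         c = target - app
--         if c in app2:
--             t = target
--         else:
--             if ms == target:
--                 continue
--             lo = ms - app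
--             if lo < 0:
--                 lo = 0
--             best = None
--             for k in app2:
--                 if lo <= k < c and (best is None or k > best):
--                     best = k
--             if best is None:
--                 continue
--             c = best
--             t = app + c
--         if ms < t:
--             ms = t
--             fin = []
--         for f in app1[app]:
--             for b in app2[c]:
--                 fin.append([f, b])
--     return fin
-- ===== Notes on version B (the rewrite author's own statement) =====
-- stated objective: faster
-- what changed: A's fallback searches for the best complement by counting an integer down from target-app-1 and testing dict membership at every value (O(target) per miss); B instead takes the largest qualifying key in a single pass over app2's keys (O(|app2|) per miss), and the pair emission drops A's temp_list append/pop juggling for plain nested loops.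
import Mathlib
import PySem

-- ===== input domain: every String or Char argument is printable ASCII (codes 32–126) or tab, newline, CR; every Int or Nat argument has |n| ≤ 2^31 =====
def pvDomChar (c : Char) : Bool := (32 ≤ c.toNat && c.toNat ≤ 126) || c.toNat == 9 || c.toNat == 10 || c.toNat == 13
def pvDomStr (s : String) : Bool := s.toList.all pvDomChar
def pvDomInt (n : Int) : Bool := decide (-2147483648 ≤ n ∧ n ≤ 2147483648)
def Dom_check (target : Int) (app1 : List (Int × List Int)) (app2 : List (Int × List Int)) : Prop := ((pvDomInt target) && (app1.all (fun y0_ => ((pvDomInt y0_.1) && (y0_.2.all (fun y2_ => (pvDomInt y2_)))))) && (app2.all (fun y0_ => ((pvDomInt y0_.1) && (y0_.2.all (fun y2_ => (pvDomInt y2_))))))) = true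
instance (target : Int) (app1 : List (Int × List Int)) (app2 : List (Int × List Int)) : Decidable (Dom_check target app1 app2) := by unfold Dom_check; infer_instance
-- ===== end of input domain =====

-- B replaces A's downward linear integer scan for the best complement (O(target) per miss) by a
-- single max-pass over app2's keys (O(|app2|) per miss); return value only, no shared state mutated.

-- ===== PORT A =====
-- xs.pop(i); in A's code every pop is in range, the identity fallback is a totalization guard only
def popAt (xs : List Int) (i : Int) : List Int :=
  match PySem.List.pop? xs i with
  | some p => p.2
  | none => xs

-- A's combinations(): the temp_list append/pop(1)/pop() dance, transliterated
def combosA (t : Int) (d1 d2 : PySem.Dict Int (List Int)) (fin : List (List Int)) (ms : Int)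
    (app c : Int) : Int × List (List Int) :=
  let ms' := if ms < t then t else ms
  let fin' := if ms < t then ([] : List (List Int)) else fin
  let r := (d1.getD app []).foldl
    (fun (st : List Int × List (List Int)) f =>
      let temp := st.1 ++ [f]
      let inner := (d2.getD c []).foldl
        (fun (st2 : List Int × List (List Int)) b =>
          let temp2 := st2.1 ++ [b]
          (popAt temp2 1, st2.2 ++ [temp2]))
        (temp, st.2)
      (popAt inner.1 (-1), inner.2))
    (([] : List Int), fin')
  (ms', r.2)

-- A's while loop: complement counts down from c while c ≥ 0 and app + c ≥ ms
def scanA (d2 : PySem.Dict Int (List Int)) (ms app : Int) (c : Int) : Option Int :=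
  if h : c < 0 ∨ app + c < ms then none
  else if d2.contains c then some c
  else scanA d2 ms app (c - 1)
termination_by (c + 1).toNat
decreasing_by rcases not_or.mp h with ⟨_, _⟩; omega

def check (target : Int) (app1 : List (Int × List Int)) (app2 : List (Int × List Int)) : List (List Int) :=
  let d1 := PySem.Dict.ofList app1
  let d2 := PySem.Dict.ofList app2
  (d1.keys.foldl
    (fun (st : Int × List (List Int)) app =>
      let c := target - app
      if d2.contains c then combosA target d1 d2 st.2 st.1 app c
      else if st.1 = target then st
      else
        match scanA d2 st.1 app (c - 1) with
        | some c' => combosA (app + c') d1 d2 st.2 st.1 app c'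
        | none => st)
    (0, [])).2

-- ===== PORT B =====
-- B's single pass over app2's keys: best = largest k with lo ≤ k < c
def bestLoop (keys : List Int) (lo c : Int) : Option Int :=
  keys.foldl
    (fun best k =>
      if lo ≤ k ∧ k < c then
        match best with
        | none => some k
        | some b => if b < k then some k else best
      else best)
    none

-- B's common tail: maybe reset, then nested append loops
def emitB (t : Int) (d1 d2 : PySem.Dict Int (List Int)) (st : Int × List (List Int))
    (app c : Int) : Int × List (List Int) :=
  let ms := if st.1 < t then t else st.1
  let fin0 := if st.1 < t then ([] : List (List Int)) else st.2
  (ms, (d1.getD app []).foldl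
    (fun fin f => (d2.getD c []).foldl (fun fin b => fin ++ [[f, b]]) fin) fin0)

def check_alt (target : Int) (app1 : List (Int × List Int)) (app2 : List (Int × List Int)) : List (List Int) :=
  let d1 := PySem.Dict.ofList app1
  let d2 := PySem.Dict.ofList app2
  (d1.keys.foldl
    (fun (st : Int × List (List Int)) app =>
      let c := target - app
      if d2.contains c then emitB target d1 d2 st app c
      else if st.1 = target then st
      else
        let lo := if st.1 - app < 0 then 0 else st.1 - app
        match bestLoop d2.keys lo c with
        | none => st
        | some k => emitB (app + k) d1 d2 st app k)
    (0, [])).2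

-- ===== PRECONDITION & SPEC =====
def Spec_check (target : Int) (app1 : List (Int × List Int)) (app2 : List (Int × List Int)) (out : List (List Int)) : Prop := out = check_alt target app1 app2
instance (target : Int) (app1 : List (Int × List Int)) (app2 : List (Int × List Int)) (out : List (List Int)) : Decidable (Spec_check target app1 app2 out) := by unfold Spec_check; infer_instance

-- ===== CLAIM (what is proved, stated in full; the proofs are below) =====
def Claim_equal_check : Prop := ∀ (target : Int) (app1 : List (Int × List Int)) (app2 : List (Int × List Int)), Dom_check target app1 app2 → Spec_check target app1 app2 (check target app1 app2)

-- ===== LEMMAS AND PROOFS =====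
theorem popAt_pair (f b : Int) : popAt [f, b] 1 = [f] := by
  simp [popAt, PySem.List.pop?, PySem.List.pyIdx?]

theorem popAt_single (f : Int) : popAt [f] (-1) = [] := by
  simp [popAt, PySem.List.pop?, PySem.List.pyIdx?]

theorem innerA_eq (bs : List Int) (f : Int) (fin : List (List Int)) :
    bs.foldl (fun (st2 : List Int × List (List Int)) b =>
        (popAt (st2.1 ++ [b]) 1, st2.2 ++ [st2.1 ++ [b]])) ([f], fin)
      = ([f], fin ++ bs.map (fun b => [f, b])) := by
  induction bs generalizing fin with
  | nil => simp
  | cons b bs ih =>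
      simp only [List.foldl_cons, List.cons_append, List.nil_append, popAt_pair, ih]
      simp

theorem outerA_eq (as bs : List Int) (fin : List (List Int)) :
    as.foldl (fun (st : List Int × List (List Int)) f =>
        let temp := st.1 ++ [f]
        let inner := bs.foldl (fun (st2 : List Int × List (List Int)) b =>
            (popAt (st2.1 ++ [b]) 1, st2.2 ++ [st2.1 ++ [b]])) (temp, st.2)
        (popAt inner.1 (-1), inner.2)) ([], fin)
      = ([], fin ++ as.flatMap (fun f => bs.map (fun b => [f, b]))) := by
  induction as generalizing fin with
  | nil => simp
  | cons a as ih =>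
      simp only [List.foldl_cons, List.nil_append, innerA_eq, popAt_single, ih]
      simp

theorem combosA_eq_emitB (t : Int) (d1 d2 : PySem.Dict Int (List Int)) (st : Int × List (List Int))
    (app c : Int) : combosA t d1 d2 st.2 st.1 app c = emitB t d1 d2 st app c := by
  unfold combosA emitB
  simp only [outerA_eq, PySem.List.foldl_append_singleton_eq_map, PySem.List.foldl_append_eq_flatMap]
theorem scanA_some (d2 : PySem.Dict Int (List Int)) (ms app c : Int) :
    ∀ (k : Int), scanA d2 ms app c = some k →
      0 ≤ k ∧ ms ≤ app + k ∧ k ≤ c ∧ d2.contains k = true ∧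
        (∀ j, k < j → j ≤ c → d2.contains j = false) := by
  fun_induction scanA d2 ms app c with
  | case1 c h => intro k hk; simp at hk
  | case2 c h hc => intro k hk
                    cases hk
                    refine ⟨by omega, by omega, le_refl _, hc, fun j h1 h2 => by omega⟩
  | case3 c h hc ih =>
      intro k hk
      obtain ⟨h1, h2, h3, h4, h5⟩ := ih k hk
      refine ⟨h1, h2, by omega, h4, fun j hj1 hj2 => ?_⟩
      rcases lt_or_eq_of_le hj2 with hlt | rfl
      · exact h5 j hj1 (by omega)
      · simpa using hc

theorem scanA_none (d2 : PySem.Dict Int (List Int)) (ms app c : Int) :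
    scanA d2 ms app c = none →
      ∀ j, 0 ≤ j → ms ≤ app + j → j ≤ c → d2.contains j = false := by
  fun_induction scanA d2 ms app c with
  | case1 c h => intro _ j hj1 hj2 hj3; omega
  | case2 c h hc => intro hk; simp at hk
  | case3 c h hc ih =>
      intro hk j hj1 hj2 hj3
      rcases lt_or_eq_of_le hj3 with hlt | rfl
      · exact ih hk j hj1 hj2 (by omega)
      · simpa using hc
theorem bl_main (lo c : Int) :
    ∀ (keys : List Int) (acc : Option Int),
      (keys.foldl (fun best k =>
          if lo ≤ k ∧ k < c then
            match best with
            | none => some k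
            | some b => if b < k then some k else best
          else best) acc = none → acc = none ∧ ∀ k ∈ keys, ¬(lo ≤ k ∧ k < c)) ∧
      (∀ m, keys.foldl (fun best k =>
          if lo ≤ k ∧ k < c then
            match best with
            | none => some k
            | some b => if b < k then some k else best
          else best) acc = some m →
        (acc = some m ∨ (m ∈ keys ∧ lo ≤ m ∧ m < c)) ∧
        (∀ k ∈ keys, lo ≤ k → k < c → k ≤ m) ∧
        (∀ b, acc = some b → b ≤ m)) := by
  intro keys
  induction keys with
  | nil => intro acc; constructor
           · intro h; simp at h ⊢; exact h
           · intro m h; simp at h; simp [h]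
  | cons k keys ih =>
      intro acc
      simp only [List.foldl_cons, List.mem_cons]
      by_cases hq : lo ≤ k ∧ k < c
      · simp only [if_pos hq]
        cases acc with
        | none =>
            constructor
            · intro h
              exact absurd ((ih (some k)).2 ) (by
                intro h2
                obtain ⟨h3, _⟩ := (ih (some k)).1 h
                simp at h3)
            · intro m h
              obtain ⟨hsrc, hmax, hacc⟩ := (ih (some k)).2 m h
              refine ⟨?_, ?_, by intro b hb; simp at hb⟩
              · rcases hsrc with h | h
                · obtain rfl : k = m := by simpa using h
                  right; exact ⟨Or.inl rfl, hq⟩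
                · right; exact ⟨Or.inr h.1, h.2⟩
              · intro j hj hj1 hj2
                rcases hj with rfl | hj
                · exact hacc j rfl
                · exact hmax j hj hj1 hj2
        | some b =>
            by_cases hbk : b < k
            · simp only [if_pos hbk]
              constructor
              · intro h
                obtain ⟨h3, _⟩ := (ih (some k)).1 h
                simp at h3
              · intro m h
                obtain ⟨hsrc, hmax, hacc⟩ := (ih (some k)).2 m h
                refine ⟨?_, ?_, ?_⟩
                · rcases hsrc with h | h
                  · obtain rfl : k = m := by simpa using h
                    right; exact ⟨Or.inl rfl, hq⟩
                  · right; exact ⟨Or.inr h.1, h.2⟩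
                · intro j hj hj1 hj2
                  rcases hj with rfl | hj
                  · exact hacc j rfl
                  · exact hmax j hj hj1 hj2
                · intro b' hb'; cases hb'
                  have := hacc k rfl; omega
            · simp only [if_neg hbk]
              constructor
              · intro h
                obtain ⟨h3, _⟩ := (ih (some b)).1 h
                simp at h3
              · intro m h
                obtain ⟨hsrc, hmax, hacc⟩ := (ih (some b)).2 m h
                refine ⟨?_, ?_, ?_⟩
                · rcases hsrc with h | h
                  · left; exact h
                  · right; exact ⟨Or.inr h.1, h.2⟩
                · intro j hj hj1 hj2
                  rcases hj with rfl | hj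
                  · have := hacc b rfl; omega
                  · exact hmax j hj hj1 hj2
                · intro b' hb'; cases hb'; exact hacc _ rfl
      · simp only [if_neg hq]
        constructor
        · intro h
          obtain ⟨h1, h2⟩ := (ih acc).1 h
          exact ⟨h1, by rintro j (rfl | hj); exact hq; exact h2 j hj⟩
        · intro m h
          obtain ⟨hsrc, hmax, hacc⟩ := (ih acc).2 m h
          refine ⟨?_, ?_, hacc⟩
          · rcases hsrc with h | h
            · left; exact h
            · right; exact ⟨Or.inr h.1, h.2⟩
          · rintro j (rfl | hj) hj1 hj2
            · exact absurd ⟨hj1, hj2⟩ hq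
            · exact hmax j hj hj1 hj2
theorem scan_eq_best (d2 : PySem.Dict Int (List Int)) (ms app c0 : Int) :
    scanA d2 ms app (c0 - 1)
      = bestLoop d2.keys (if ms - app < 0 then 0 else ms - app) c0 := by
  set lo := if ms - app < 0 then 0 else ms - app with hlo
  have hlo0 : 0 ≤ lo := by rw [hlo]; split <;> omega
  have hloms : ∀ j : Int, (lo ≤ j ∧ j < c0) ↔ (0 ≤ j ∧ ms ≤ app + j ∧ j ≤ c0 - 1) := by
    intro j; rw [hlo]; split <;> omega
  unfold bestLoop
  cases hs : scanA d2 ms app (c0 - 1) with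
  | none =>
      cases hb : d2.keys.foldl (fun best k =>
          if lo ≤ k ∧ k < c0 then
            match best with
            | none => some k
            | some b => if b < k then some k else best
          else best) none with
      | none => rfl
      | some m =>
          obtain ⟨hsrc, _, _⟩ := (bl_main lo c0 d2.keys none).2 m hb
          rcases hsrc with h | ⟨hm, hq1, hq2⟩
          · simp at h
          · have h0 := (hloms m).mp ⟨hq1, hq2⟩
            have := scanA_none d2 ms app (c0 - 1) hs m h0.1 h0.2.1 h0.2.2
            have hc : d2.contains m = true := (PySem.Dict.contains_iff_mem_keys _ _).mpr hm
            rw [this] at hc; cases hc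
  | some k =>
      obtain ⟨h1, h2, h3, h4, h5⟩ := scanA_some d2 ms app (c0 - 1) k hs
      have hkmem : k ∈ d2.keys := (PySem.Dict.contains_iff_mem_keys _ _).mp h4
      have hkq : lo ≤ k ∧ k < c0 := (hloms k).mpr ⟨h1, h2, h3⟩
      cases hb : d2.keys.foldl (fun best k =>
          if lo ≤ k ∧ k < c0 then
            match best with
            | none => some k
            | some b => if b < k then some k else best
          else best) none with
      | none =>
          obtain ⟨_, hall⟩ := (bl_main lo c0 d2.keys none).1 hb
          exact absurd hkq (hall k hkmem)
      | some m =>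
          obtain ⟨hsrc, hmax, _⟩ := (bl_main lo c0 d2.keys none).2 m hb
          rcases hsrc with h | ⟨hm, hq1, hq2⟩
          · simp at h
          · have hkm : k ≤ m := hmax k hkmem hkq.1 hkq.2
            rcases lt_or_eq_of_le hkm with hlt | rfl
            · have := h5 m hlt (by omega)
              have hc : d2.contains m = true := (PySem.Dict.contains_iff_mem_keys _ _).mpr hm
              rw [this] at hc; cases hc
            · rfl
theorem step_eq (target : Int) (d1 d2 : PySem.Dict Int (List Int))
    (st : Int × List (List Int)) (app : Int) :
    (if d2.contains (target - app) then combosA target d1 d2 st.2 st.1 app (target - app)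
     else if st.1 = target then st
     else match scanA d2 st.1 app (target - app - 1) with
       | some c' => combosA (app + c') d1 d2 st.2 st.1 app c'
       | none => st)
    = (if d2.contains (target - app) then emitB target d1 d2 st app (target - app)
       else if st.1 = target then st
       else match bestLoop d2.keys (if st.1 - app < 0 then 0 else st.1 - app) (target - app) with
         | none => st
         | some k => emitB (app + k) d1 d2 st app k) := by
  split_ifs with h1 h2 h3
  · exact combosA_eq_emitB _ _ _ _ _ _
  · rfl
  · have e := scan_eq_best d2 st.1 app (target - app)
    rw [if_pos h3] at e
    rw [← e]
    cases scanA d2 st.1 app (target - app - 1) with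
    | none => rfl
    | some c' => exact combosA_eq_emitB _ _ _ _ _ _
  · have e := scan_eq_best d2 st.1 app (target - app)
    rw [if_neg h3] at e
    rw [← e]
    cases scanA d2 st.1 app (target - app - 1) with
    | none => rfl
    | some c' => exact combosA_eq_emitB _ _ _ _ _ _

theorem check_eq (target : Int) (app1 app2 : List (Int × List Int)) :
    check target app1 app2 = check_alt target app1 app2 := by
  unfold check check_alt
  have h : (fun (st : Int × List (List Int)) app =>
      if (PySem.Dict.ofList app2).contains (target - app) then
        combosA target (PySem.Dict.ofList app1) (PySem.Dict.ofList app2) st.2 st.1 app (target - app)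
      else if st.1 = target then st
      else match scanA (PySem.Dict.ofList app2) st.1 app (target - app - 1) with
        | some c' => combosA (app + c') (PySem.Dict.ofList app1) (PySem.Dict.ofList app2) st.2 st.1 app c'
        | none => st)
    = (fun (st : Int × List (List Int)) app =>
      if (PySem.Dict.ofList app2).contains (target - app) then
        emitB target (PySem.Dict.ofList app1) (PySem.Dict.ofList app2) st app (target - app)
      else if st.1 = target then st
      else match bestLoop (PySem.Dict.ofList app2).keys (if st.1 - app < 0 then 0 else st.1 - app) (target - app) with
        | none => st
        | some k => emitB (app + k) (PySem.Dict.ofList app1) (PySem.Dict.ofList app2) st app k) := by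
    funext st app
    exact step_eq target (PySem.Dict.ofList app1) (PySem.Dict.ofList app2) st app
  simp only []
  rw [h]

-- ===== VERDICT (by name: the statement is the Claim_ definition above) =====
theorem check_spec : Claim_equal_check := by
  intro target app1 app2 _
  unfold Spec_check
  exact check_eq target app1 app2
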